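-- pv_equiv track=rewrite | github.com/raykpridgen/hpc | src/apply_leakage_policy.py | _baseline_forbidden
-- ===== SOURCE A (Python) =====
-- from typing import Dict, Iterable, List, Sequence, Set, Tuple
--
-- def _baseline_forbidden(columns: Sequence[str], target_col: str) -> Set[str]:
--     forbidden = set()
--     for col in ("total_io", "runtime", "runtime_scaled"):
--         if col in columns:
--             forbidden.add(col)
--     # start/end timestamps trivially reconstruct runtime.
--     for col in ("start_time", "end_time"):
--         if col in columns:
--             forbidden.add(col)
--     # Protect against accidental target leakage columns.
--     for col in columns:
--         if col.lower() in {"target", "label"}: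
--             forbidden.add(col)
--     if target_col in forbidden:
--         forbidden.remove(target_col)
--     return forbidden
-- ===== SOURCE B (Python) =====
-- def _baseline_forbidden(columns, target_col):
--     # Single-pass state machine over columns: one boolean flag per fixed leakage
--     # name plus an ordered list of target-like columns, assembled at the end.
--     io = rt = rts = st = et = False
--     targety = []
--     for c in columns:
--         if c == "total_io":
--             io = True
--         elif c == "runtime":
--             rt = True
--         elif c == "runtime_scaled":
--             rts = True
--         elif c == "start_time":
--             st = True
--         elif c == "end_time":
--             et = True
--         elif c.lower() in ("target", "label") and c not in targety:
--             targety.append(c)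
--     pairs = (("total_io", io), ("runtime", rt), ("runtime_scaled", rts),
--              ("start_time", st), ("end_time", et))
--     forbidden = [name for name, hit in pairs if hit] + targety
--     return {c for c in forbidden if c != target_col}
-- ===== Notes on version B (the rewrite author's own statement) =====
-- stated objective: alternative
-- what changed: A's five separate `col in columns` membership scans plus a third loop are replaced by a single pass over columns driving a state machine (one boolean flag per fixed leakage name plus an ordered accumulator of target-like columns), with the forbidden set assembled from the flags at the end.
import Mathlib
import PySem

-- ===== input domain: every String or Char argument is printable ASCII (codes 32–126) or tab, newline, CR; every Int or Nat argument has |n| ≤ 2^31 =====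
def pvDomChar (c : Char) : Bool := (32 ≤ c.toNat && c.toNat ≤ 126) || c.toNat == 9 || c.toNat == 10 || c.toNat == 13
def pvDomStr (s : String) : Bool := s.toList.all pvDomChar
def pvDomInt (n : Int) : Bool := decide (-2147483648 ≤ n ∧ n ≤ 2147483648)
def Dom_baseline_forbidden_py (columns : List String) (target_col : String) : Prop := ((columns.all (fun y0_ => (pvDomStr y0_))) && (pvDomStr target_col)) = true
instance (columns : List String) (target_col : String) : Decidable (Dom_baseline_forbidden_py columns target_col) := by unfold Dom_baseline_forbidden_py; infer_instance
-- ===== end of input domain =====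

-- B replaces A's five separate `col in columns` scans and three accumulation loops by a
-- single pass over columns driving a state machine (one flag per fixed leakage name plus
-- an ordered accumulator of target-like columns), assembled at the end; objective: alternative.

-- ===== PORT A =====
def baseline_forbidden_py (columns : List String) (target_col : String) : List String :=
  let forbidden : PySem.Set String := PySem.Set.empty
  let forbidden := (["total_io", "runtime", "runtime_scaled"] : List String).foldl
    (fun s col => if columns.contains col then PySem.Set.add s col else s) forbidden
  let forbidden := (["start_time", "end_time"] : List String).foldl
    (fun s col => if columns.contains col then PySem.Set.add s col else s) forbidden
  let forbidden := columns.foldl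
    (fun s col => if PySem.Set.contains (PySem.Set.ofList ["target", "label"]) (PySem.Str.lower col)
                  then PySem.Set.add s col else s) forbidden
  if PySem.Set.contains forbidden target_col then
    (PySem.Set.remove? forbidden target_col).getD forbidden  -- guarded by the contains check, so remove never raises
  else forbidden

-- ===== PORT B =====
-- the loop body of Source B's single pass (state: five flags + the target-like accumulator)
def pvStepB (s : Bool × Bool × Bool × Bool × Bool × List String) (c : String) :
    Bool × Bool × Bool × Bool × Bool × List String :=
  let (io, rt, rts, stt, et, t) := s
  if c == "total_io" then (true, rt, rts, stt, et, t)
  else if c == "runtime" then (io, true, rts, stt, et, t)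
  else if c == "runtime_scaled" then (io, rt, true, stt, et, t)
  else if c == "start_time" then (io, rt, rts, true, et, t)
  else if c == "end_time" then (io, rt, rts, stt, true, t)
  else if (["target", "label"] : List String).contains (PySem.Str.lower c) && !t.contains c
    then (io, rt, rts, stt, et, t ++ [c])
  else s

def baseline_forbidden_py_alt (columns : List String) (target_col : String) : List String :=
  let res := columns.foldl pvStepB (false, false, false, false, false, [])
  let (io, rt, rts, stt, et, t) := res
  let pairs : List (String × Bool) :=
    [("total_io", io), ("runtime", rt), ("runtime_scaled", rts), ("start_time", stt), ("end_time", et)]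
  let forbidden := (pairs.filter (fun p => p.2)).map (fun p => p.1) ++ t
  PySem.Set.ofList (forbidden.filter (fun c => c != target_col))

-- ===== PRECONDITION & SPEC =====
def Spec_baseline_forbidden_py (columns : List String) (target_col : String) (out : List String) : Prop := out = baseline_forbidden_py_alt columns target_col
instance (columns : List String) (target_col : String) (out : List String) : Decidable (Spec_baseline_forbidden_py columns target_col out) := by unfold Spec_baseline_forbidden_py; infer_instance

-- ===== CLAIM (what is proved, stated in full; the proofs are below) =====
def Claim_equal_baseline_forbidden_py : Prop := ∀ (columns : List String) (target_col : String), Dom_baseline_forbidden_py columns target_col → Spec_baseline_forbidden_py columns target_col (baseline_forbidden_py columns target_col)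

-- ===== LEMMAS AND PROOFS =====

-- the target/label predicate, shared shape of both ports' tests
def pvP (c : String) : Bool := (["target", "label"] : List String).contains (PySem.Str.lower c)

def pvFixed : List String := ["total_io", "runtime", "runtime_scaled", "start_time", "end_time"]

lemma pvP_eq_A (c : String) :
    PySem.Set.contains (PySem.Set.ofList ["target", "label"]) (PySem.Str.lower c) = pvP c := by
  simp [pvP, PySem.Set.contains_eq_listContains]

lemma pvP_not_fixed {y : String} (hp : pvP y = true) : y ∉ pvFixed := by
  intro hm
  simp only [pvFixed, List.mem_cons, List.not_mem_nil, or_false] at hm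
  rcases hm with h | h | h | h | h <;> subst h <;> simp [pvP, PySem.Str.lower] at hp <;> revert hp <;> decide

lemma fixed_folds (columns : List String) :
    (["start_time", "end_time"] : List String).foldl
      (fun s col => if columns.contains col then PySem.Set.add s col else s)
      ((["total_io", "runtime", "runtime_scaled"] : List String).foldl
        (fun s col => if columns.contains col then PySem.Set.add s col else s) PySem.Set.empty)
    = pvFixed.filter (fun c => columns.contains c) := by
  simp only [pvFixed, List.foldl, List.filter]
  split_ifs <;> simp_all

lemma foldl_if_add (l : List String) (s : PySem.Set String) (p : String → Bool) :
    l.foldl (fun s c => if p c then PySem.Set.add s c else s) s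
      = (l.filter p).foldl PySem.Set.add s := by
  induction l generalizing s with
  | nil => rfl
  | cons x xs ih => simp only [List.foldl, List.filter]; split_ifs with h <;> simp [h, ih]

lemma third_loop (columns : List String) (s : PySem.Set String)
    (hdisj : ∀ y, pvP y = true → y ∉ s) :
    columns.foldl (fun s c => if pvP c then PySem.Set.add s c else s) s
      = s ++ PySem.Set.ofList (columns.filter pvP) := by
  rw [foldl_if_add]
  have h1 : (columns.filter pvP).foldl PySem.Set.add s = PySem.Set.update s (columns.filter pvP) := rfl
  rw [h1, PySem.Set.update_eq_append_filter]
  congr 1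
  apply List.filter_eq_self.mpr
  intro y hy
  have hyp : pvP y = true := by
    have := (PySem.Set.mem_ofList _ _).mp hy
    exact (List.mem_filter.mp this).2
  have hny := hdisj y hyp
  simp [PySem.Set.contains_eq_listContains, List.contains_eq_mem, hny]

lemma fixedF_sub (columns : List String) {y : String}
    (h : y ∈ pvFixed.filter (fun c => columns.contains c)) : y ∈ pvFixed :=
  (List.mem_filter.mp h).1

lemma nodup_L (columns : List String) :
    ((pvFixed.filter (fun c => columns.contains c)) ++ PySem.Set.ofList (columns.filter pvP)).Nodup := by
  refine List.Nodup.append ?_ (PySem.Set.nodup_ofList _) ?_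
  · exact List.Nodup.filter _ (by decide)
  · intro a ha hb
    have hp : pvP a = true := (List.mem_filter.mp ((PySem.Set.mem_ofList _ _).mp hb)).2
    exact pvP_not_fixed hp (fixedF_sub columns ha)

lemma filter_bne_of_not_mem {l : List String} {t : String} (h : t ∉ l) :
    l.filter (fun c => c != t) = l := by
  apply List.filter_eq_self.mpr
  intro y hy
  simp only [bne_iff_ne, ne_eq]
  rintro rfl; exact h hy

-- characterization of Source B's single-pass fold
lemma foldB_char (l : List String) (io rt rts stt et : Bool) (t : List String) :
    l.foldl pvStepB (io, rt, rts, stt, et, t) =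
      (io || l.contains "total_io", rt || l.contains "runtime", rts || l.contains "runtime_scaled",
       stt || l.contains "start_time", et || l.contains "end_time",
       (l.filter pvP).foldl PySem.Set.add t) := by
  induction l generalizing io rt rts stt et t with
  | nil => simp
  | cons c cs ih =>
    simp only [List.foldl, List.contains_cons, List.filter]
    by_cases h1 : c = "total_io"
    · subst h1
      rw [show pvP "total_io" = false by decide]
      simp [pvStepB, ih]
    · by_cases h2 : c = "runtime"
      · subst h2
        rw [show pvP "runtime" = false by decide]
        simp [pvStepB, ih]
      · by_cases h3 : c = "runtime_scaled"
        · subst h3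
          rw [show pvP "runtime_scaled" = false by decide]
          simp [pvStepB, ih]
        · by_cases h4 : c = "start_time"
          · subst h4
            rw [show pvP "start_time" = false by decide]
            simp [pvStepB, ih]
          · by_cases h5 : c = "end_time"
            · subst h5
              rw [show pvP "end_time" = false by decide]
              simp [pvStepB, ih]
            · have f1 : (c == "total_io") = false := beq_eq_false_iff_ne.mpr h1
              have f2 : (c == "runtime") = false := beq_eq_false_iff_ne.mpr h2
              have f3 : (c == "runtime_scaled") = false := beq_eq_false_iff_ne.mpr h3
              have f4 : (c == "start_time") = false := beq_eq_false_iff_ne.mpr h4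
              have f5 : (c == "end_time") = false := beq_eq_false_iff_ne.mpr h5
              have e1 : ("total_io" == c) = false := beq_eq_false_iff_ne.mpr (Ne.symm h1)
              have e2 : ("runtime" == c) = false := beq_eq_false_iff_ne.mpr (Ne.symm h2)
              have e3 : ("runtime_scaled" == c) = false := beq_eq_false_iff_ne.mpr (Ne.symm h3)
              have e4 : ("start_time" == c) = false := beq_eq_false_iff_ne.mpr (Ne.symm h4)
              have e5 : ("end_time" == c) = false := beq_eq_false_iff_ne.mpr (Ne.symm h5)
              by_cases hp : pvP c = true
              · have hlow : PySem.Str.lower c = "target" ∨ PySem.Str.lower c = "label" := by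
                  simpa [pvP] using hp
                have hb : (decide (PySem.Str.lower c = "target") || decide (PySem.Str.lower c = "label")) = true := by
                  simpa [pvP] using hp
                by_cases hm : c ∈ t
                · simp [pvStepB, pvP, f1, f2, f3, f4, f5, e1, e2, e3, e4, e5, hm, hb, ih,
                        PySem.Set.add, PySem.Set.contains_eq_listContains]
                · simp [pvStepB, pvP, f1, f2, f3, f4, f5, e1, e2, e3, e4, e5, hm, hlow, ih,
                        PySem.Set.add, PySem.Set.contains_eq_listContains]
              · simp only [Bool.not_eq_true] at hp
                have hlow : ¬(PySem.Str.lower c = "target" ∨ PySem.Str.lower c = "label") := by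
                  simpa [pvP] using hp
                have hb : (decide (PySem.Str.lower c = "target") || decide (PySem.Str.lower c = "label")) = false := by
                  simpa [pvP] using hp
                simp [pvStepB, pvP, f1, f2, f3, f4, f5, e1, e2, e3, e4, e5, hlow, ih]

-- assembly from the flags equals the fixed list filtered by membership in columns
lemma pairs_assembly (columns : List String) :
    (([("total_io", (false : Bool) || columns.contains "total_io"),
       ("runtime", (false : Bool) || columns.contains "runtime"),
       ("runtime_scaled", (false : Bool) || columns.contains "runtime_scaled"),
       ("start_time", (false : Bool) || columns.contains "start_time"),
       ("end_time", (false : Bool) || columns.contains "end_time")] : List (String × Bool)).filter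
        (fun p => p.2)).map (fun p => p.1)
      = pvFixed.filter (fun c => columns.contains c) := by
  cases hA : columns.contains "total_io" <;> cases hB : columns.contains "runtime" <;>
    cases hC : columns.contains "runtime_scaled" <;> cases hD : columns.contains "start_time" <;>
    cases hE : columns.contains "end_time" <;>
    simp_all [pvFixed, List.filter, List.contains_eq_mem]

-- ===== VERDICT (by name: the statement is the Claim_ definition above) =====
theorem baseline_forbidden_py_spec : Claim_equal_baseline_forbidden_py := by
  intro columns target_col _
  have hdisj : ∀ y, pvP y = true → y ∉ pvFixed.filter (fun c => columns.contains c) :=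
    fun y hp hm => pvP_not_fixed hp (fixedF_sub columns hm)
  have hnd := nodup_L columns
  have hB : baseline_forbidden_py_alt columns target_col
      = ((pvFixed.filter (fun c => columns.contains c)) ++ PySem.Set.ofList (columns.filter pvP)).filter
          (fun c => c != target_col) := by
    show PySem.Set.ofList _ = _
    simp only [foldB_char, pairs_assembly]
    have hfold : (columns.filter pvP).foldl PySem.Set.add ([] : List String)
        = PySem.Set.ofList (columns.filter pvP) := rfl
    rw [hfold]
    exact PySem.Set.ofList_eq_self_of_nodup _ (List.Nodup.filter _ hnd)
  unfold Spec_baseline_forbidden_py baseline_forbidden_py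
  simp only [pvP_eq_A, fixed_folds]
  rw [third_loop columns _ hdisj, hB]
  set L := (pvFixed.filter (fun c => columns.contains c)) ++ PySem.Set.ofList (columns.filter pvP) with hL
  by_cases hmem : target_col ∈ L
  · have hc : PySem.Set.contains L target_col = true := by
      simp [PySem.Set.contains_eq_listContains, List.contains_eq_mem, hmem]
    rw [if_pos hc, PySem.Set.remove?_of_mem hmem, Option.getD_some]
    rfl
  · have hc : ¬ PySem.Set.contains L target_col = true := by
      simp [PySem.Set.contains_eq_listContains, List.contains_eq_mem, hmem]
    rw [if_neg hc, filter_bne_of_not_mem hmem]
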